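-- pv_equiv track=rewrite | github.com/Zeronus/cs-archive | Assignment 6 Programming Python/eto.py | eto
-- ===== SOURCE A (Python) =====
-- def eto(lst):
--     if lst == []:
--         return []
--     else:
--         if lst[0]%2 == 0:
--             return [lst[0]] + eto(lst[1:])
--         else:
--             return eto(lst[1:]) + [lst[0]]
-- ===== SOURCE B (Python) =====
-- def eto(lst):
--     evens = [x for x in lst if x % 2 == 0]
--     odds = [x for x in lst if x % 2 != 0]
--     return evens + odds[::-1]
-- ===== Notes on version B (the rewrite author's own statement) =====
-- stated objective: simpler
-- what changed: Replaces the quadratic structural recursion (list concatenation at each step) with two linear filtering passes: evens kept in order, odds filtered then reversed, concatenated once.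
import Mathlib
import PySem

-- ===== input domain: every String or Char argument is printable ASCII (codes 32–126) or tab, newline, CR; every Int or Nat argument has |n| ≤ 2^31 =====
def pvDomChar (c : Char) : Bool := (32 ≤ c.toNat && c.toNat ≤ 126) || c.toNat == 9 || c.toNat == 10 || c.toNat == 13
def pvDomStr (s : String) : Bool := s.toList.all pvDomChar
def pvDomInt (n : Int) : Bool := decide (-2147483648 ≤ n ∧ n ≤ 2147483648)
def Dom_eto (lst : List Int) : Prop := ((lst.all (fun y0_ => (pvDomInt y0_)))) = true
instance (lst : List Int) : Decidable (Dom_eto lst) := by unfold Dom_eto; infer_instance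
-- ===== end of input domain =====

-- B replaces A's structural recursion by two filter passes (evens kept, odds reversed), concatenated once: simpler and linear-time.


-- ===== PORT A =====
def eto (lst : List Int) : List Int :=
  match lst with
  | [] => []
  | x :: rest =>
      if PySem.Int.mod x 2 = 0 then
        [x] ++ eto rest
      else
        eto rest ++ [x]

-- ===== PORT B =====
def eto_alt (lst : List Int) : List Int :=
  let evens := lst.filter (fun x => PySem.Int.mod x 2 = 0)
  let odds := lst.filter (fun x => PySem.Int.mod x 2 ≠ 0)
  evens ++ odds.reverse

-- ===== PRECONDITION & SPEC =====
def Spec_eto (lst : List Int) (out : List Int) : Prop := out = eto_alt lst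
instance (lst : List Int) (out : List Int) : Decidable (Spec_eto lst out) := by unfold Spec_eto; infer_instance

-- ===== CLAIM (what is proved, stated in full; the proofs are below) =====
def Claim_equal_eto : Prop := ∀ (lst : List Int), Dom_eto lst → Spec_eto lst (eto lst)

-- ===== LEMMAS AND PROOFS =====
theorem pymod2 (x : Int) : PySem.Int.mod x 2 = x % 2 := by
  simp [PySem.Int.mod, Int.fmod_eq_emod]

theorem eto_eq_alt (lst : List Int) : eto lst = eto_alt lst := by
  induction lst with
  | nil => rfl
  | cons x rest ih =>
      simp only [eto, eto_alt, List.filter_cons, pymod2] at ih ⊢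
      by_cases h : x % 2 = 0
      · simp [h, ih]
      · have h1 : x % 2 = 1 := by omega
        simp [h1, ih]

-- ===== VERDICT (by name: the statement is the Claim_ definition above) =====
theorem eto_spec : Claim_equal_eto := by
  intro lst _
  exact eto_eq_alt lst
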